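-- pv_equiv track=rewrite | github.com/danlizard/Chem-a-Guess | dict_func.py | group_extract
-- ===== SOURCE A (Python) =====
-- def group_extract(stat, line, operline, gr, grdict):
--     loclist = []
--     locop = ''.join(line.split('^'))
--     uppercase = 'QWERTYUIOPASDFGHJKLZXCVBNM^~'
--     lowercase = 'qwertyuiopasdfghjklzxcvbnm'
--     if gr in line:
--         while gr in line:
--             site = line.find(gr)
--             i = 0
--             for el in stat[:site+1]:
--                 if el in uppercase:
--                     i+=1
--             loclist.append([i, grdict[gr]])
--             operline = operline.replace(gr[1:],"^"*len(gr[1:]), 1)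
--             line = line.replace(gr[1:],"^"*len(gr[1:]), 1)
--             operline = ''.join(operline.split('^'))
--             operline = ''.join(operline.split('()'))
--     else:
--         site = locop.find(gr)
--         i = 0
--         for el in stat[:site+1]:
--             if el in uppercase:
--                 i+=1
--         loclist.append([i, grdict[gr]])
--         operline = operline.replace(gr[1:],"^"*len(gr[1:]), 1)
--         line = line.replace(gr[1:],"^"*len(gr[1:]), 1)
--         operline = ''.join(operline.split('^'))
--         operline = ''.join(operline.split('()'))
--     return operline, line, loclist
-- ===== SOURCE B (Python) =====
-- def group_extract(stat, line, operline, gr, grdict):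
--     # Different decomposition: one prefix-sum pass over `stat` replaces A's per-occurrence
--     # counting loop; the hoisted sub/caret/val and a count-1 deletion replace A's
--     # replace-with-carets trick on operline.
--     uppercase = 'QWERTYUIOPASDFGHJKLZXCVBNM^~'
--     pre = [0]
--     t = 0
--     for c in stat:
--         t += c in uppercase
--         pre.append(t)
--     sub = gr[1:]
--     caret = '^' * len(sub)
--     val = grdict[gr]
--     loclist = []
--     if gr in line:
--         while gr in line:
--             site = line.find(gr)
--             loclist.append([pre[min(site + 1, len(stat))], val])
--             operline = ''.join(operline.replace(sub, '', 1).split('^'))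
--             operline = ''.join(operline.split('()'))
--             line = line.replace(sub, caret, 1)
--     else:
--         site = ''.join(line.split('^')).find(gr)
--         loclist.append([pre[min(site + 1, len(stat))], val])
--         operline = ''.join(operline.replace(sub, '', 1).split('^'))
--         operline = ''.join(operline.split('()'))
--         line = line.replace(sub, caret, 1)
--     return operline, line, loclist
-- ===== Notes on version B (the rewrite author's own statement) =====
-- stated objective: alternative
-- what changed: B replaces A's per-occurrence rescan of stat (an inner loop counting uppercase characters for every found site) with a single prefix-sum array built once and indexed by min(site+1, len(stat)), hoists the loop-invariant sub/caret/dict lookup out of the loop, and deletes the first occurrence of gr[1:] from operline directly (count-1 replace with '') instead of A's replace-with-'^'*k-then-strip trick.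
import Mathlib
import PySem

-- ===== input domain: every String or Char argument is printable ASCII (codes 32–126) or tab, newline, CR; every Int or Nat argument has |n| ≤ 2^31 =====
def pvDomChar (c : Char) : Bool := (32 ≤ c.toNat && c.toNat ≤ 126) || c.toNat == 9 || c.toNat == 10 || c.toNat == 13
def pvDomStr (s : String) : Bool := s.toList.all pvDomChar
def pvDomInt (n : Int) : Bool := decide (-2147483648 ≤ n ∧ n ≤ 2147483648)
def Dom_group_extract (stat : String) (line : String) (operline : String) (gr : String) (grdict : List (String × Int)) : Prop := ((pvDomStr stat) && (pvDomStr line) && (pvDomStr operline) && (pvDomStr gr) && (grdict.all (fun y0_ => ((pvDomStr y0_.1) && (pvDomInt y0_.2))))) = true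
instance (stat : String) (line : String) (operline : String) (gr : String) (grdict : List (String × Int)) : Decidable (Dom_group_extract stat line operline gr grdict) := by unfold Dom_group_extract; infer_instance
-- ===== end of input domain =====

-- B replaces A's per-site uppercase-counting rescan of stat with a prefix-sum array built once,
-- hoists the loop-invariant sub/caret/dict lookup, and deletes gr[1:] from operline directly
-- instead of A's replace-with-carets-then-strip trick; same return value on Pre_.


-- ===== PORT A =====
-- the literal 'QWERTYUIOPASDFGHJKLZXCVBNM^~' and the membership test 'el in uppercase'
def pvUpper : List Char := "QWERTYUIOPASDFGHJKLZXCVBNM^~".toList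
def pvUp (c : Char) : Bool := pvUpper.contains c

-- s.replace(old, new, 1): replace the leftmost occurrence of old (Python-exact, incl. old = "")
def pvReplace1Go (old new : List Char) : List Char → List Char
  | [] => []
  | c :: t => if old.isPrefixOf (c :: t) then new ++ (c :: t).drop old.length else c :: pvReplace1Go old new t
def pvReplace1 (s old new : List Char) : List Char :=
  if old = [] then new ++ s else pvReplace1Go old new s

-- ''.join(s.split('^')) and ''.join(s.split('()'))
def pvStripCaret (s : List Char) : List Char := PySem.Chars.join [] (PySem.Chars.splitOn s ['^'])
def pvStripParens (s : List Char) : List Char := PySem.Chars.join [] (PySem.Chars.splitOn s ['(', ')'])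

-- A's inner counting loop: for el in <cs>: if el in uppercase: i += 1
def pvCount (cs : List Char) : Int := cs.foldl (fun i c => if pvUp c then i + 1 else i) 0

-- A's while loop; fuel = len(line)+1 (under Pre_ each iteration removes ≥1 occurrence of gr[1:],
-- so at most len(line) iterations happen and the 0-fuel branch is never taken on Pre_ inputs)
def pvALoop (grl statl : List Char) (grdict : List (String × Int)) (gr : String) :
    Nat → List Char → List Char → List (List Int) → List Char × List Char × List (List Int)
  | 0, op, ln, acc => (op, ln, acc)
  | fuel+1, op, ln, acc =>
    if PySem.Chars.isIn grl ln then
      let site := PySem.Chars.find ln grl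
      let i := pvCount (PySem.Chars.slice statl none (some (site + 1)))
      let v := (PySem.Dict.get? ⟨grdict⟩ gr).getD 0   -- grdict[gr]; Pre_ guarantees the key exists
      let sub := grl.drop 1
      let op1 := pvStripParens (pvStripCaret (pvReplace1 op sub (List.replicate sub.length '^')))
      let ln1 := pvReplace1 ln sub (List.replicate sub.length '^')
      pvALoop grl statl grdict gr fuel op1 ln1 (acc ++ [[i, v]])
    else (op, ln, acc)

def group_extract (stat : String) (line : String) (operline : String) (gr : String) (grdict : List (String × Int)) : String × String × List (List Int) :=
  let statl := stat.toList
  let grl := gr.toList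
  let locop := pvStripCaret line.toList                -- ''.join(line.split('^'))
  if PySem.Chars.isIn grl line.toList then
    let r := pvALoop grl statl grdict gr (line.toList.length + 1) operline.toList line.toList []
    (String.ofList r.1, String.ofList r.2.1, r.2.2)
  else
    let site := PySem.Chars.find locop grl
    let i := pvCount (PySem.Chars.slice statl none (some (site + 1)))
    let v := (PySem.Dict.get? ⟨grdict⟩ gr).getD 0
    let sub := grl.drop 1
    let op1 := pvStripParens (pvStripCaret (pvReplace1 operline.toList sub (List.replicate sub.length '^')))
    let ln1 := pvReplace1 line.toList sub (List.replicate sub.length '^')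
    (String.ofList op1, String.ofList ln1, [[i, v]])

-- ===== PORT B =====
-- the prefix-sum pass: pre = [0]; t = 0; for c in stat: t += c in uppercase; pre.append(t)
def pvPre (statl : List Char) : List Int :=
  (statl.foldl (fun (p : List Int × Int) c =>
    let t := p.2 + (if pvUp c then 1 else 0); (p.1 ++ [t], t)) ([0], 0)).1

-- pre[min(site+1, len(stat))]; the index is always in range (-1 ≤ site, |pre| = len(stat)+1)
def pvLookup (pre : List Int) (statLen : Nat) (site : Int) : Int :=
  pre.getD (min (site + 1) (statLen : Int)).toNat 0

def pvBLoop (grl : List Char) (pre : List Int) (v : Int) (sub caret : List Char) (statLen : Nat) :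
    Nat → List Char → List Char → List (List Int) → List Char × List Char × List (List Int)
  | 0, op, ln, acc => (op, ln, acc)
  | fuel+1, op, ln, acc =>
    if PySem.Chars.isIn grl ln then
      let site := PySem.Chars.find ln grl
      let op1 := pvStripParens (pvStripCaret (pvReplace1 op sub []))
      let ln1 := pvReplace1 ln sub caret
      pvBLoop grl pre v sub caret statLen fuel op1 ln1 (acc ++ [[pvLookup pre statLen site, v]])
    else (op, ln, acc)

def group_extract_alt (stat : String) (line : String) (operline : String) (gr : String) (grdict : List (String × Int)) : String × String × List (List Int) :=
  let statl := stat.toList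
  let pre := pvPre statl
  let grl := gr.toList
  let sub := grl.drop 1
  let caret := List.replicate sub.length '^'
  let v := (PySem.Dict.get? ⟨grdict⟩ gr).getD 0          -- grdict[gr]; Pre_ guarantees the key exists
  if PySem.Chars.isIn grl line.toList then
    let r := pvBLoop grl pre v sub caret statl.length (line.toList.length + 1) operline.toList line.toList []
    (String.ofList r.1, String.ofList r.2.1, r.2.2)
  else
    let site := PySem.Chars.find (pvStripCaret line.toList) grl
    let op1 := pvStripParens (pvStripCaret (pvReplace1 operline.toList sub []))
    let ln1 := pvReplace1 line.toList sub caret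
    (String.ofList op1, String.ofList ln1, [[pvLookup pre statl.length site, v]])

-- ===== PRECONDITION & SPEC =====
-- Pre_ excludes inputs where gr is missing from grdict (KeyError) and inputs where gr occurs in
-- line while gr has fewer than 2 characters or contains '^' past its first character: there A's
-- while loop can run forever (this is slightly narrower than exact — on a few such inputs, e.g.
-- the cite in the claim, A still terminates, and B returns the same value there).
def Pre_group_extract (stat : String) (line : String) (operline : String) (gr : String) (grdict : List (String × Int)) : Prop :=
  (PySem.Dict.get? ⟨grdict⟩ gr).isSome = true ∧
  (PySem.Str.isIn gr line = true → 2 ≤ gr.toList.length ∧ '^' ∉ gr.toList.drop 1)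
instance (stat : String) (line : String) (operline : String) (gr : String) (grdict : List (String × Int)) : Decidable (Pre_group_extract stat line operline gr grdict) := by unfold Pre_group_extract; infer_instance

def pvWitness_group_extract : String × String × String × String × (List (String × Int)) :=
  ("AbC(", "ab(OH)c", "ab(OH)c", "(OH", [("(OH", 2)])

def Spec_group_extract (stat : String) (line : String) (operline : String) (gr : String) (grdict : List (String × Int)) (out : String × String × List (List Int)) : Prop := out = group_extract_alt stat line operline gr grdict
instance (stat : String) (line : String) (operline : String) (gr : String) (grdict : List (String × Int)) (out : String × String × List (List Int)) : Decidable (Spec_group_extract stat line operline gr grdict out) := by unfold Spec_group_extract; infer_instance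

-- ===== CLAIM (what is proved, stated in full; the proofs are below) =====
def Claim_equal_group_extract : Prop := ∀ (stat : String) (line : String) (operline : String) (gr : String) (grdict : List (String × Int)), Dom_group_extract stat line operline gr grdict → Pre_group_extract stat line operline gr grdict → Spec_group_extract stat line operline gr grdict (group_extract stat line operline gr grdict)


-- ===== LEMMAS AND PROOFS =====

-- ''.join(parts) concatenates
theorem pv_join_nil : ∀ (parts : List (List Char)), PySem.Chars.join [] parts = parts.flatten
  | [] => by simp [PySem.Chars.join_nil]
  | [x] => by simp [PySem.Chars.join_singleton]
  | x :: y :: t => by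
      rw [PySem.Chars.join_cons_cons, pv_join_nil (y :: t)]
      simp

theorem pv_splitGo_caret : ∀ (fuel : Nat) (l cur : List Char) (acc : List (List Char)),
    l.length ≤ fuel →
    (PySem.Chars.splitOn.go ['^'] fuel l cur acc).flatten =
    acc.reverse.flatten ++ cur.reverse ++ l.filter (fun c => c != '^') := by
  intro fuel
  induction fuel with
  | zero =>
    intro l cur acc h
    have hl : l = [] := List.eq_nil_of_length_eq_zero (Nat.le_zero.mp h)
    subst hl
    simp [PySem.Chars.splitOn.go]
  | succ n ih =>
    intro l cur acc h
    cases l with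
    | nil => simp [PySem.Chars.splitOn.go]
    | cons c t =>
      by_cases hc : c = '^'
      · subst hc
        have hb : (['^'].isPrefixOf ('^' :: t)) = true := by simp [List.isPrefixOf]
        simp only [PySem.Chars.splitOn.go, hb, if_true]
        rw [show List.drop ['^'].length ('^' :: t) = t from rfl]
        rw [ih t [] (cur.reverse :: acc) (by simpa using Nat.le_of_succ_le_succ h)]
        simp
      · have hb : (['^'].isPrefixOf (c :: t)) = false := by
          simp [List.isPrefixOf]
          exact fun hcc => absurd hcc.symm hc
        simp only [PySem.Chars.splitOn.go, hb, if_false, Bool.false_eq_true]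
        rw [ih t (c :: cur) acc (by simpa using Nat.le_of_succ_le_succ h)]
        simp [hc]

-- ''.join(s.split('^')) removes exactly the '^' characters
theorem pv_stripCaret_filter (s : List Char) : pvStripCaret s = s.filter (fun c => c != '^') := by
  unfold pvStripCaret
  rw [pv_join_nil]
  rw [show PySem.Chars.splitOn s ['^'] = PySem.Chars.splitOn.go ['^'] (s.length + 1) s [] [] from rfl]
  rw [pv_splitGo_caret (s.length + 1) s [] [] (by omega)]
  simp

theorem pv_filter_replaceGo (sub : List Char) :
    ∀ s : List Char,
    (pvReplace1Go sub (List.replicate sub.length '^') s).filter (fun c => c != '^') =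
    (pvReplace1Go sub [] s).filter (fun c => c != '^')
  | [] => rfl
  | c :: t => by
      simp only [pvReplace1Go]
      by_cases hp : sub.isPrefixOf (c :: t)
      · simp [hp, List.filter_append]
      · simp only [hp, Bool.false_eq_true, if_false, List.filter_cons]
        rw [pv_filter_replaceGo sub t]

-- stripping '^' after a count-1 replacement by '^'*k equals stripping after deletion
theorem pv_strip_replace (op sub : List Char) :
    pvStripCaret (pvReplace1 op sub (List.replicate sub.length '^')) =
    pvStripCaret (pvReplace1 op sub []) := by
  by_cases hsub : sub = []
  · subst hsub; rfl
  · unfold pvReplace1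
    simp only [hsub, if_false]
    rw [pv_stripCaret_filter, pv_stripCaret_filter, pv_filter_replaceGo]

theorem pv_findGo_ge (sub : List Char) : ∀ (s : List Char) (k : Nat),
    -1 ≤ PySem.Chars.find.go sub s k
  | [], k => by
      simp only [PySem.Chars.find.go]
      split
      · exact le_trans (by omega) (Int.natCast_nonneg k)
      · omega
  | c :: t, k => by
      simp only [PySem.Chars.find.go]
      split
      · exact le_trans (by omega) (Int.natCast_nonneg k)
      · exact pv_findGo_ge sub t (k + 1)

-- find returns -1 or a nonnegative index
theorem pv_find_ge (s sub : List Char) : -1 ≤ PySem.Chars.find s sub :=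
  pv_findGo_ge sub s 0

theorem pv_fold_scanl (cs : List Char) :
    ∀ (acc : List Int) (t : Int),
    cs.foldl (fun (p : List Int × Int) c =>
      (p.1 ++ [p.2 + (if pvUp c then 1 else 0)], p.2 + (if pvUp c then 1 else 0)))
      (acc ++ [t], t) =
    (acc ++ List.scanl (fun t c => t + (if pvUp c then 1 else 0)) t cs,
     cs.foldl (fun t c => t + (if pvUp c then 1 else 0)) t) := by
  induction cs with
  | nil => intro acc t; simp [List.scanl_nil]
  | cons a l ih =>
    intro acc t
    simp only [List.foldl_cons, List.scanl_cons]
    rw [ih (acc ++ [t]) (t + (if pvUp a then 1 else 0))]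
    simp

-- the prefix array is a scanl
theorem pv_pre_scanl (statl : List Char) :
    pvPre statl = List.scanl (fun t c => t + (if pvUp c then 1 else 0)) 0 statl := by
  unfold pvPre
  rw [show ([(0 : Int)], (0 : Int)) = (([] : List Int) ++ [(0 : Int)], (0 : Int)) from by simp]
  rw [pv_fold_scanl statl [] 0]
  simp

-- indexing the scanl at min n len counts the uppercase characters of the length-n prefix
theorem pv_scanl_getD : ∀ (cs : List Char) (t : Int) (n : Nat),
    (List.scanl (fun t c => t + (if pvUp c then 1 else 0)) t cs).getD (min n cs.length) 0 =
    (cs.take n).foldl (fun i c => if pvUp c then i + 1 else i) t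
  | [], t, n => by simp [List.scanl_nil]
  | a :: l, t, n => by
      cases n with
      | zero => simp [List.scanl_cons]
      | succ n =>
        simp only [List.scanl_cons, List.length_cons, Nat.succ_min_succ, Nat.succ_eq_add_one,
          List.getD_cons_succ, List.take_succ_cons, List.foldl_cons]
        rw [pv_scanl_getD l (t + (if pvUp a then 1 else 0)) n]
        congr 1
        split <;> ring

-- B's prefix-array lookup equals A's counting loop over stat[:site+1]
theorem pv_count_lookup (statl : List Char) (site : Int) (h : -1 ≤ site) :
    pvCount (PySem.Chars.slice statl none (some (site + 1))) =
    pvLookup (pvPre statl) statl.length site := by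
  have h1 : 0 ≤ site + 1 := by omega
  rw [show PySem.Chars.slice statl none (some (site + 1)) =
      PySem.List.slice statl none (some (site + 1)) from by
    simp [PySem.Chars.slice_eq_listSlice]]
  rw [PySem.List.slice_to statl h1]
  unfold pvLookup
  rw [pv_pre_scanl]
  have hmin : (min (site + 1) ((statl.length : Nat) : Int)).toNat
      = min (site + 1).toNat statl.length := by omega
  rw [hmin, pv_scanl_getD statl 0 (site + 1).toNat]
  rfl

-- the two while loops agree step for step
theorem pv_loop_eq (grl statl : List Char) (grdict : List (String × Int)) (gr : String) :
    ∀ (fuel : Nat) (op ln : List Char) (acc : List (List Int)),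
    pvALoop grl statl grdict gr fuel op ln acc =
    pvBLoop grl (pvPre statl) ((PySem.Dict.get? ⟨grdict⟩ gr).getD 0) (grl.drop 1)
      (List.replicate (grl.drop 1).length '^') statl.length fuel op ln acc
  | 0, op, ln, acc => by simp [pvALoop, pvBLoop]
  | fuel + 1, op, ln, acc => by
      simp only [pvALoop, pvBLoop]
      by_cases h : PySem.Chars.isIn grl ln = true
      · simp only [h, if_true]
        rw [pv_count_lookup statl (PySem.Chars.find ln grl) (pv_find_ge ln grl)]
        rw [pv_strip_replace op (grl.drop 1)]
        exact pv_loop_eq grl statl grdict gr fuel _ _ _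
      · simp [h]

-- ===== VERDICT (by name: the statement is the Claim_ definition above) =====
theorem group_extract_spec : Claim_equal_group_extract := by
  intro stat line operline gr grdict _ _
  unfold Spec_group_extract group_extract group_extract_alt
  simp only []
  by_cases h : PySem.Chars.isIn gr.toList line.toList = true
  · rw [if_pos h, if_pos h, pv_loop_eq]
  · rw [if_neg h, if_neg h,
      pv_strip_replace operline.toList (gr.toList.drop 1),
      pv_count_lookup stat.toList _ (pv_find_ge (pvStripCaret line.toList) gr.toList)]
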